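-- pv_equiv track=rewrite | github.com/devanshijain11/AAD_practicals | p1b.py | closest_pairs_sum
-- ===== SOURCE A (Python) =====
-- def closest_pairs_sum(numbers):
--     min_sum = float('inf')
--     closest_pairs = []
--
--     n = len(numbers)
--     # Generate all possible Pair
--     for i in range(n):
--         for j in range(i + 1, n):
--             pair = (numbers[i], numbers[j])
--             current_sum = sum(pair)
--             if abs(current_sum) < abs(min_sum):
--                 # if true it will update sum and reset the value of min sum
--                 min_sum = current_sum
--                 closest_pairs = [pair]
--                 # else if it will append the pair into closest_pair array
--             elif abs(current_sum) == abs(min_sum):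
--                 closest_pairs.append(pair)
--
--     return closest_pairs
-- ===== SOURCE B (Python) =====
-- def closest_pairs_sum(numbers):
--     # Enumerate pairs once; compute the minimal |a+b| offline, then filter.
--     pairs = [(a, b) for i, a in enumerate(numbers) for b in numbers[i + 1:]]
--     if not pairs:
--         return []
--     m = min(abs(a + b) for a, b in pairs)
--     return [p for p in pairs if abs(p[0] + p[1]) == m]
-- ===== Notes on version B (the rewrite author's own statement) =====
-- stated objective: alternative
-- what changed: Replaces A's online single-pass state machine (running min with reset-or-append list) by an offline two-phase computation: materialise the pair list once, take the minimum |a+b|, then filter the pairs achieving it.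
import Mathlib
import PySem

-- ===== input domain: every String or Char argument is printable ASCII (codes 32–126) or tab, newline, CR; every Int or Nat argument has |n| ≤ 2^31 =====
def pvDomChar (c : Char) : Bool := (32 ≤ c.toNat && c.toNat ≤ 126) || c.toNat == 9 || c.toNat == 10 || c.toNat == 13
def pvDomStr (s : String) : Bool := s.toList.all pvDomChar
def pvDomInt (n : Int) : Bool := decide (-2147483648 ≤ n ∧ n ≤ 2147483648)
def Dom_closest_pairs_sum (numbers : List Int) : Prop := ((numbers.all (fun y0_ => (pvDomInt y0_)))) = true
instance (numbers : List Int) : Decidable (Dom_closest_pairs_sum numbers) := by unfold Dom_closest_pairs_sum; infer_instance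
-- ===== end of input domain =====

-- B replaces A's online running-min state machine by an offline pass: build the pair
-- list, take the minimal |a+b|, filter the pairs achieving it (alternative, same cost).


-- ===== PORT A =====
-- min_sum = float('inf') is modelled by (none : Option Int): none = inf (any |sum| < inf).
-- numbers[i]/numbers[j] via pyGetD: i, j always lie in range(len(numbers)), so exact.
def closest_pairs_sum (numbers : List Int) : List (Int × Int) :=
  let n : Int := PySem.List.len numbers
  let st :=
    (PySem.List.pyRange 0 n 1).foldl (fun st i =>
      (PySem.List.pyRange (i + 1) n 1).foldl (fun st j =>
        let pair : Int × Int := (PySem.List.pyGetD numbers i 0, PySem.List.pyGetD numbers j 0)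
        let currentSum := pair.1 + pair.2
        match st.1 with
        | none => (some currentSum, [pair])
        | some ms =>
          if |currentSum| < |ms| then (some currentSum, [pair])
          else if |currentSum| = |ms| then (st.1, st.2 ++ [pair])
          else st) st)
      ((none : Option Int), ([] : List (Int × Int)))
  st.2

-- ===== PORT B =====
def closest_pairs_sum_alt (numbers : List Int) : List (Int × Int) :=
  let pairs : List (Int × Int) :=
    (PySem.List.enumerate numbers 0).flatMap (fun ia =>
      (PySem.List.slice numbers (some (ia.1 + 1)) none).map (fun b => (ia.2, b)))
  if pairs = [] then []
  else
    match PySem.List.min? (pairs.map (fun p => |p.1 + p.2|)) (fun x => x) with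
    | none => []
    | some m => pairs.filter (fun p => |p.1 + p.2| == m)

-- ===== PRECONDITION & SPEC =====
def Spec_closest_pairs_sum (numbers : List Int) (out : List (Int × Int)) : Prop := out = closest_pairs_sum_alt numbers
instance (numbers : List Int) (out : List (Int × Int)) : Decidable (Spec_closest_pairs_sum numbers out) := by unfold Spec_closest_pairs_sum; infer_instance

-- ===== CLAIM (what is proved, stated in full; the proofs are below) =====
def Claim_equal_closest_pairs_sum : Prop := ∀ (numbers : List Int), Dom_closest_pairs_sum numbers → Spec_closest_pairs_sum numbers (closest_pairs_sum numbers)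

-- ===== LEMMAS AND PROOFS =====

-- A's loop body, on a materialised pair.
def cpsStep (st : Option Int × List (Int × Int)) (pair : Int × Int) : Option Int × List (Int × Int) :=
  let currentSum := pair.1 + pair.2
  match st.1 with
  | none => (some currentSum, [pair])
  | some ms =>
    if |currentSum| < |ms| then (some currentSum, [pair])
    else if |currentSum| = |ms| then (st.1, st.2 ++ [pair])
    else st

def cpsAbs (p : Int × Int) : Int := |p.1 + p.2|

-- The pair list both programs traverse (B's `pairs`), named for the proofs.
def cpsPairs (numbers : List Int) : List (Int × Int) :=
  (PySem.List.enumerate numbers 0).flatMap (fun ia =>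
    (PySem.List.slice numbers (some (ia.1 + 1)) none).map (fun b => (ia.2, b)))

lemma cps_foldl_flatMap {α β γ : Type} (f : γ → β → γ) (g : α → List β) (l : List α) (s : γ) :
    l.foldl (fun s x => (g x).foldl f s) s = (l.flatMap g).foldl f s := by
  induction l generalizing s with
  | nil => rfl
  | cons x t ih => simp [List.flatMap_cons, List.foldl_append, ih]

lemma cps_range_getD (numbers : List Int) (a : Nat) :
    (PySem.List.pyRange (a:Int) (numbers.length:Int) 1).map (fun j => PySem.List.pyGetD numbers j 0)
      = numbers.drop a := by
  apply List.ext_getElem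
  · simp [PySem.List.length_pyRange_one]
  · intro k h1 h2
    simp only [List.getElem_map, PySem.List.getElem_pyRange_one]
    have hc : ((a:Int) + (k:Int)) = ((a + k : Nat) : Int) := by push_cast; ring
    have hlt : a + k < numbers.length := by
      simp [PySem.List.length_pyRange_one] at h1; omega
    rw [hc, PySem.List.pyGetD_natCast, List.getD_eq_getElem _ _ hlt, List.getElem_drop]

lemma cps_pairsA (numbers : List Int) :
    (PySem.List.pyRange 0 (PySem.List.len numbers) 1).flatMap (fun i =>
        (PySem.List.pyRange (i + 1) (PySem.List.len numbers) 1).map (fun j =>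
          ((PySem.List.pyGetD numbers i 0, PySem.List.pyGetD numbers j 0) : Int × Int)))
      = cpsPairs numbers := by
  unfold cpsPairs
  rw [PySem.List.enumerate_eq_map_pyRange (d := 0), List.flatMap_map, PySem.List.len_eq]
  apply List.flatMap_congr
  intro i hi
  rw [PySem.List.mem_pyRange_one] at hi
  obtain ⟨h0, hn⟩ := hi
  simp only
  rw [PySem.List.slice_from numbers (show (0:Int) ≤ i + 1 by omega)]
  have hca : (i + 1) = (((i.toNat + 1 : Nat)) : Int) := by omega
  have hct : (i + 1).toNat = i.toNat + 1 := by omega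
  rw [hct, hca, ← cps_range_getD numbers (i.toNat + 1), List.map_map]
  apply List.map_congr_left
  intro j hj
  simp

lemma cps_head_min (c : Int) (t : List Int) : c = t.foldl min c ↔ ∀ y ∈ t, c ≤ y := by
  constructor
  · intro h y hy
    have := (PySem.List.foldl_min_le t c).2 y hy
    omega
  · intro h
    rcases PySem.List.foldl_min_mem t c with h1 | h1
    · omega
    · have h2 := (PySem.List.foldl_min_le t c).1
      have := h _ h1
      omega

lemma cps_fold_char (P : List (Int × Int)) : ∀ (ms : Int) (acc : List (Int × Int)),
    ∃ s : Int, |s| = (P.map cpsAbs).foldl min |ms| ∧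
      P.foldl cpsStep (some ms, acc) =
        (some s,
         (if ∀ q ∈ P, |ms| ≤ cpsAbs q then acc else []) ++
           P.filter (fun q => cpsAbs q == (P.map cpsAbs).foldl min |ms|)) := by
  induction P with
  | nil => intro ms acc; exact ⟨ms, by simp⟩
  | cons p P' ih =>
    intro ms acc
    by_cases hlt : |p.1 + p.2| < |ms|
    · -- strict improvement: reset
      obtain ⟨s, hs, hfold⟩ := ih (p.1 + p.2) [p]
      refine ⟨s, ?_, ?_⟩
      · rw [hs]
        simp only [List.map_cons, List.foldl_cons, cpsAbs]
        congr 1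
        omega
      · have hstep : cpsStep (some ms, acc) p = (some (p.1 + p.2), [p]) := by
          simp [cpsStep, hlt]
        rw [List.foldl_cons, hstep, hfold]
        have hmin : min |ms| (cpsAbs p) = |p.1 + p.2| := by simp [cpsAbs]; omega
        have hM : ((p :: P').map cpsAbs).foldl min |ms| = (P'.map cpsAbs).foldl min |p.1 + p.2| := by
          simp only [List.map_cons, List.foldl_cons, hmin]
        have hcond : ¬ (∀ q ∈ p :: P', |ms| ≤ cpsAbs q) := by
          intro h; have := h p (by simp); simp [cpsAbs] at this; omega
        rw [if_neg hcond, hM]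
        simp only [List.nil_append]
        rw [List.filter_cons]
        by_cases hall : ∀ q ∈ P', |p.1 + p.2| ≤ cpsAbs q
        · have hceq : cpsAbs p = (P'.map cpsAbs).foldl min |p.1 + p.2| := by
            show (|p.1 + p.2| : Int) = _
            rw [cps_head_min]
            intro y hy; simp only [List.mem_map] at hy
            obtain ⟨q, hq, rfl⟩ := hy; exact hall q hq
          rw [if_pos hall, ← hceq]
          simp
        · have hcne : ¬ (cpsAbs p = (P'.map cpsAbs).foldl min |p.1 + p.2|) := by
            intro h
            rw [show cpsAbs p = |p.1 + p.2| from rfl, cps_head_min] at h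
            exact hall fun q hq => h _ (List.mem_map_of_mem hq)
          rw [if_neg hall, if_neg (by simpa using hcne)]
          simp
    · by_cases heq : |p.1 + p.2| = |ms|
      · -- tie: append
        obtain ⟨s, hs, hfold⟩ := ih ms (acc ++ [p])
        have hmin : min |ms| (cpsAbs p) = |ms| := by simp [cpsAbs]; omega
        have hM : ((p :: P').map cpsAbs).foldl min |ms| = (P'.map cpsAbs).foldl min |ms| := by
          simp only [List.map_cons, List.foldl_cons, hmin]
        refine ⟨s, by rw [hs, hM], ?_⟩
        have hstep : cpsStep (some ms, acc) p = (some ms, acc ++ [p]) := by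
          simp [cpsStep, heq]
        rw [List.foldl_cons, hstep, hfold, hM]
        have hcond : (∀ q ∈ p :: P', |ms| ≤ cpsAbs q) ↔ (∀ q ∈ P', |ms| ≤ cpsAbs q) := by
          constructor
          · intro h q hq; exact h q (List.mem_cons_of_mem _ hq)
          · intro h q hq
            rcases List.mem_cons.mp hq with rfl | hq'
            · simp [cpsAbs]; omega
            · exact h q hq'
        rw [List.filter_cons]
        by_cases hall : ∀ q ∈ P', |ms| ≤ cpsAbs q
        · have hceq : cpsAbs p = (P'.map cpsAbs).foldl min |ms| := by
            have : (|ms| : Int) = (P'.map cpsAbs).foldl min |ms| := by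
              rw [cps_head_min]
              intro y hy; simp only [List.mem_map] at hy
              obtain ⟨q, hq, rfl⟩ := hy; exact hall q hq
            rw [show cpsAbs p = |ms| from heq, ← this]
          rw [if_pos hall, if_pos (hcond.mpr hall), ← hceq, if_pos (by simp)]
          simp [List.append_assoc]
        · have hcne : ¬ (cpsAbs p = (P'.map cpsAbs).foldl min |ms|) := by
            intro h
            push Not at hall
            obtain ⟨q, hq, hqlt⟩ := hall
            have h1 := (PySem.List.foldl_min_le (P'.map cpsAbs) |ms|).2 (cpsAbs q) (List.mem_map_of_mem hq)
            rw [show cpsAbs p = |ms| from heq] at h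
            omega
          rw [if_neg hall, if_neg (fun h => hall (hcond.mp h)), if_neg (by simpa using hcne)]
      · -- worse: unchanged
        obtain ⟨s, hs, hfold⟩ := ih ms acc
        have hmin : min |ms| (cpsAbs p) = |ms| := by simp [cpsAbs]; omega
        have hM : ((p :: P').map cpsAbs).foldl min |ms| = (P'.map cpsAbs).foldl min |ms| := by
          simp only [List.map_cons, List.foldl_cons, hmin]
        refine ⟨s, by rw [hs, hM], ?_⟩
        have hstep : cpsStep (some ms, acc) p = (some ms, acc) := by
          simp [cpsStep, hlt, heq]
        rw [List.foldl_cons, hstep, hfold, hM]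
        have hcond : (∀ q ∈ p :: P', |ms| ≤ cpsAbs q) ↔ (∀ q ∈ P', |ms| ≤ cpsAbs q) := by
          constructor
          · intro h q hq; exact h q (List.mem_cons_of_mem _ hq)
          · intro h q hq
            rcases List.mem_cons.mp hq with rfl | hq'
            · simp [cpsAbs]; omega
            · exact h q hq'
        rw [List.filter_cons]
        have hcne : ¬ (cpsAbs p = (P'.map cpsAbs).foldl min |ms|) := by
          intro h
          have h1 := (PySem.List.foldl_min_le (P'.map cpsAbs) |ms|).1
          simp only [cpsAbs] at h
          omega
        have hb : (cpsAbs p == List.foldl min |ms| (List.map cpsAbs P')) = false := by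
          simpa using hcne
        simp only [hb, Bool.false_eq_true, if_false]
        by_cases hall : ∀ q ∈ P', |ms| ≤ cpsAbs q
        · rw [if_pos hall, if_pos (hcond.mpr hall)]
        · rw [if_neg hall, if_neg (fun h => hall (hcond.mp h))]

lemma cps_A_eq (numbers : List Int) :
    closest_pairs_sum numbers = ((cpsPairs numbers).foldl cpsStep ((none : Option Int), ([] : List (Int × Int)))).2 := by
  unfold closest_pairs_sum
  rw [← cps_pairsA, ← cps_foldl_flatMap]
  simp only [List.foldl_map]
  rfl

lemma cps_B_eq (numbers : List Int) :
    closest_pairs_sum_alt numbers =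
      (if cpsPairs numbers = [] then []
       else
         match PySem.List.min? ((cpsPairs numbers).map cpsAbs) (fun x => x) with
         | none => []
         | some m => (cpsPairs numbers).filter (fun p => cpsAbs p == m)) := rfl

theorem closest_pairs_sum_spec : Claim_equal_closest_pairs_sum := by
  intro numbers _
  unfold Spec_closest_pairs_sum
  rw [cps_A_eq, cps_B_eq]
  cases h : cpsPairs numbers with
  | nil => simp
  | cons p P' =>
    have hstep : cpsStep ((none : Option Int), ([] : List (Int × Int))) p
        = (some (p.1 + p.2), [p]) := by simp [cpsStep]
    obtain ⟨s, hs, hfold⟩ := cps_fold_char P' (p.1 + p.2) [p]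
    rw [List.foldl_cons, hstep, hfold]
    simp only [List.map_cons, PySem.List.min?_id_cons, List.filter_cons]
    have hM : (P'.map cpsAbs).foldl min |p.1 + p.2| = (P'.map cpsAbs).foldl min (cpsAbs p) := rfl
    by_cases hall : ∀ q ∈ P', |p.1 + p.2| ≤ cpsAbs q
    · have hceq : cpsAbs p = (P'.map cpsAbs).foldl min (cpsAbs p) := by
        rw [show cpsAbs p = |p.1 + p.2| from rfl] at *
        rw [cps_head_min]
        intro y hy; simp only [List.mem_map] at hy
        obtain ⟨q, hq, rfl⟩ := hy; exact hall q hq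
      rw [if_pos hall, hM, ← hceq, if_pos (show (cpsAbs p == cpsAbs p) = true by simp)]
      simp
    · have hcne : ¬ (cpsAbs p = (P'.map cpsAbs).foldl min (cpsAbs p)) := by
        intro hh
        rw [show cpsAbs p = |p.1 + p.2| from rfl, cps_head_min] at hh
        exact hall fun q hq => hh _ (List.mem_map_of_mem hq)
      rw [if_neg hall, hM,
        if_neg (show ¬((cpsAbs p == (P'.map cpsAbs).foldl min (cpsAbs p)) = true) by
          simpa using hcne)]
      simp
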